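-- pv_equiv track=rewrite | github.com/docToolchain/aoc-2021 | day06/rockstar/AlexisTM/rock.py | ShopPreparation
-- ===== SOURCE A (Python) =====
-- HashTable16 = [
--     "50027",
--     "61138",
--     "0224",
--     "1335",
--     "2446",
--     "3557",
--     "4668",
--     "507",
--     "618"
-- ]
--
-- def QuickChange(array):
--     iter = []
--     for val in array:
--         # while len(array) > 0:
--         #    val = array.pop()
--         iter.append(HashTable16[int(val)])
--     iter = "".join(iter)
--     return iter
--
-- def ShopPreparation(max=8):
--     shop = [0]*(max+1)
--     while max >= 0:
--         iteration = [max]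
--         iteration = QuickChange(iteration)
--         iteration = QuickChange(iteration)
--         iteration = QuickChange(iteration)
--         iteration = QuickChange(iteration)
--         iteration = QuickChange(iteration)
--         iteration = QuickChange(iteration)
--         iteration = QuickChange(iteration)
--         iteration = QuickChange(iteration)
--         shop[max] = iteration
--         max = max - 1
--     return shop
-- ===== SOURCE B (Python) =====
-- HashTable16 = [
--     "50027",
--     "61138",
--     "0224",
--     "1335",
--     "2446",
--     "3557",
--     "4668",
--     "507",
--     "618"
-- ]
--
-- def expand(d, depth):
--     if depth == 0:
--         return str(d)
--     return "".join(expand(int(c), depth - 1) for c in HashTable16[d])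
--
-- def ShopPreparation(max=8):
--     return [expand(i, 8) for i in range(max + 1)]
-- ===== Notes on version B (the rewrite author's own statement) =====
-- stated objective: simpler
-- what changed: Replaces A's eight unrolled breadth-first whole-string substitution passes (QuickChange applied level by level, storing into a pre-allocated list by a decrementing while loop) with a single depth-first recursive expander expand(d, depth) that concatenates fully-expanded subtrees per digit, mapped over range(max+1).
import Mathlib
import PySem

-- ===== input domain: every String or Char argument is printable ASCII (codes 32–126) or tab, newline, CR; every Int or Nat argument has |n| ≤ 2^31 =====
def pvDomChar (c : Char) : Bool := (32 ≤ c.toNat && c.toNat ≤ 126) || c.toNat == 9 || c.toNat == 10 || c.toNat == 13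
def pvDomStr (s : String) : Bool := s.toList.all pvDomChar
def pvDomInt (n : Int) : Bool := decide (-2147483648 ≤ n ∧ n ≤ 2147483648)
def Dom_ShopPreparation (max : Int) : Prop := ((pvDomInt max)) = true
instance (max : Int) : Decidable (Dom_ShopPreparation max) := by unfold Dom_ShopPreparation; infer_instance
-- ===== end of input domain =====

set_option maxRecDepth 4000


-- B replaces A's eight unrolled breadth-first substitution passes with one depth-first
-- recursive expander; same exact output (objective: simpler decomposition, not faster).

-- ===== PORT A =====
def HashTable16 : List String :=
  ["50027", "61138", "0224", "1335", "2446", "3557", "4668", "507", "618"]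

-- QuickChange on a string argument (every call after the first): append HashTable16[int(val)]
-- per character to a list of pieces, then "".join.
def QuickChange (s : String) : Option String :=
  (s.toList.foldl
      (fun acc c => acc.bind fun pieces =>
        ((PySem.Int.ofChars? [c]).bind (fun d => PySem.List.pyGet? HashTable16 d)).map
          (fun t => pieces ++ [t]))
      (some [])).map (PySem.Str.join "")

-- the first call QuickChange([max]): one int element, so iter = [HashTable16[max]], joined
def QuickChangeInt (m : Int) : Option String :=
  ((PySem.List.pyGet? HashTable16 m).map (fun t => [t])).map (PySem.Str.join "")

-- the 8 unrolled QuickChange passes of A's loop body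
def iter8A (m : Int) : Option String :=
  ((((((((QuickChangeInt m).bind QuickChange).bind QuickChange).bind QuickChange).bind
      QuickChange).bind QuickChange).bind QuickChange).bind QuickChange)

-- the while loop: shop[max] = iteration; max = max - 1  (fuel = number of iterations)
def loopA : Nat → Int → List String → List String
  | 0, _, shop => shop
  | fuel + 1, m, shop =>
    if m ≥ 0 then
      loopA fuel (m - 1) (PySem.List.pySetD shop m ((iter8A m).getD ""))
    else shop

def ShopPreparation (max : Int) : List String :=
  loopA (max + 1).toNat max (List.replicate (max + 1).toNat "")

-- ===== PORT B =====
-- expand(d, depth): str(d) at depth 0, else concatenate expand(int(c), depth-1) over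
-- the characters of HashTable16[d]  (depth-first expansion)
def expandF : Nat → Int → Option String
  | 0, d => some (PySem.Int.toStr d)
  | n + 1, d =>
    (PySem.List.pyGet? HashTable16 d).bind fun s =>
      (s.toList.foldl
          (fun acc c => acc.bind fun pieces =>
            ((PySem.Int.ofChars? [c]).bind (fun dc => expandF n dc)).map
              (fun t => pieces ++ [t]))
          (some [])).map (PySem.Str.join "")

def ShopPreparation_alt (max : Int) : List String :=
  (PySem.List.pyRange 0 (max + 1) 1).map (fun i => (expandF 8 i).getD "")

-- ===== PRECONDITION & SPEC =====
-- Pre_ excludes max > 8, where Python A raises IndexError (HashTable16[max]).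
def Pre_ShopPreparation (max : Int) : Prop := max ≤ 8
instance (max : Int) : Decidable (Pre_ShopPreparation max) := by
  unfold Pre_ShopPreparation; infer_instance

def pvWitness_ShopPreparation : Int := 8

def Spec_ShopPreparation (max : Int) (out : List String) : Prop := out = ShopPreparation_alt max
instance (max : Int) (out : List String) : Decidable (Spec_ShopPreparation max out) := by
  unfold Spec_ShopPreparation; infer_instance

-- ===== CLAIM (what is proved, stated in full; the proofs are below) =====
def Claim_equal_ShopPreparation : Prop :=
  ∀ (max : Int), Dom_ShopPreparation max → Pre_ShopPreparation max →
    Spec_ShopPreparation max (ShopPreparation max)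

-- ===== LEMMAS AND PROOFS =====

-- proof-only model: the digit-substitution table as a function on characters
def htChars (c : Char) : List Char :=
  (if c = '0' then "50027" else if c = '1' then "61138" else if c = '2' then "0224"
   else if c = '3' then "1335" else if c = '4' then "2446" else if c = '5' then "3557"
   else if c = '6' then "4668" else if c = '7' then "507" else if c = '8' then "618"
   else "").toList

def goodC (c : Char) : Bool := (['0','1','2','3','4','5','6','7','8'] : List Char).contains c

def sub1 (l : List Char) : List Char := l.flatMap htChars

def subN : Nat → List Char → List Char
  | 0, l => l
  | n + 1, l => subN n (sub1 l)

-- the shared fold shape of both ports' join loops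
theorem foldP_none (g : Char → Option String) (l : List Char) :
    l.foldl (fun acc c => acc.bind fun pieces => (g c).map (fun t => pieces ++ [t]))
      (none : Option (List String)) = none := by
  induction l with
  | nil => rfl
  | cons c l ih => simpa using ih

theorem foldP_shift (g : Char → Option String) (l : List Char) (p : List String) :
    l.foldl (fun acc c => acc.bind fun pieces => (g c).map (fun t => pieces ++ [t])) (some p)
      = (l.foldl (fun acc c => acc.bind fun pieces => (g c).map (fun t => pieces ++ [t]))
          (some [])).map (p ++ ·) := by
  induction l generalizing p with
  | nil => simp
  | cons c l ih =>
    simp only [List.foldl_cons]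
    cases hg : g c with
    | none => simp [foldP_none]
    | some t =>
      simp only [Option.bind_some, Option.map_some, List.nil_append]
      rw [ih (p ++ [t]), ih [t]]
      cases l.foldl (fun acc c => acc.bind fun pieces => (g c).map (fun t => pieces ++ [t]))
          (some []) <;> simp

theorem foldP_good (g : Char → Option String) (h : Char → String) (l : List Char)
    (hl : ∀ c ∈ l, g c = some (h c)) :
    l.foldl (fun acc c => acc.bind fun pieces => (g c).map (fun t => pieces ++ [t])) (some [])
      = some (l.map h) := by
  induction l with
  | nil => rfl
  | cons c l ih =>
    simp only [List.foldl_cons, Option.bind_some, hl c (by simp), Option.map_some]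
    rw [foldP_shift, ih (fun c hc => hl c (by simp [hc]))]
    simp

-- "".join over a list of pieces is flatten on the character level
theorem joinNil (L : List (List Char)) : PySem.Chars.join [] L = L.flatten := by
  induction L with
  | nil => simp [PySem.Chars.join_nil]
  | cons p L ih =>
    cases L with
    | nil => simp [PySem.Chars.join_singleton]
    | cons q R => simp [PySem.Chars.join_cons_cons, ih]

theorem join_ofList (l : List Char) (f : Char → List Char) :
    PySem.Str.join "" (l.map fun c => String.ofList (f c)) = String.ofList (l.flatMap f) := by
  have h := PySem.Str.toList_join "" (l.map fun c => String.ofList (f c))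
  have : (PySem.Str.join "" (l.map fun c => String.ofList (f c))).toList = l.flatMap f := by
    rw [h]
    simp only [List.map_map]
    have : (String.toList ∘ fun c => String.ofList (f c)) = f := by
      funext c; simp
    rw [show ("" : String).toList = [] from rfl, this, joinNil, List.flatMap_def]
  calc PySem.Str.join "" (l.map fun c => String.ofList (f c))
      = String.ofList (PySem.Str.join "" (l.map fun c => String.ofList (f c))).toList := by
        rw [String.ofList_toList]
    _ = String.ofList (l.flatMap f) := by rw [this]

theorem join_single (t : String) : PySem.Str.join "" [t] = t := by
  calc PySem.Str.join "" [t] = String.ofList (PySem.Str.join "" [t]).toList := by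
        rw [String.ofList_toList]
    _ = t := by
        rw [PySem.Str.toList_join]
        simp only [List.map_cons, List.map_nil]
        rw [show ("" : String).toList = [] from rfl, PySem.Chars.join_singleton]
        exact String.ofList_toList

-- per-character table facts (finite, by enumeration)
theorem goodC_cases (c : Char) (hc : goodC c = true) :
    c = '0' ∨ c = '1' ∨ c = '2' ∨ c = '3' ∨ c = '4' ∨ c = '5' ∨ c = '6' ∨ c = '7' ∨ c = '8' := by
  simp [goodC, List.contains_eq_mem, List.mem_cons] at hc
  tauto

theorem char_fact (c : Char) (hc : goodC c = true) :
    ((PySem.Int.ofChars? [c]).bind (fun d => PySem.List.pyGet? HashTable16 d))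
      = some (String.ofList (htChars c)) := by
  rcases goodC_cases c hc with rfl|rfl|rfl|rfl|rfl|rfl|rfl|rfl|rfl <;> decide

theorem char_fact0 (c : Char) (hc : goodC c = true) :
    ((PySem.Int.ofChars? [c]).bind (fun dc => expandF 0 dc)) = some (String.ofList [c]) := by
  rcases goodC_cases c hc with rfl|rfl|rfl|rfl|rfl|rfl|rfl|rfl|rfl <;> decide

theorem htChars_good (c : Char) (hc : goodC c = true) : (htChars c).all goodC = true := by
  rcases goodC_cases c hc with rfl|rfl|rfl|rfl|rfl|rfl|rfl|rfl|rfl <;> decide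

theorem allGood_mem (l : List Char) (h : l.all goodC = true) : ∀ c ∈ l, goodC c = true := by
  simpa [List.all_eq_true] using h

theorem htChars_good_mem (c : Char) (hc : goodC c = true) : ∀ c' ∈ htChars c, goodC c' = true :=
  allGood_mem _ (htChars_good c hc)

theorem sub1_good (l : List Char) (hl : ∀ c ∈ l, goodC c = true) : ∀ c' ∈ sub1 l, goodC c' = true := by
  intro c' hc'
  rcases List.mem_flatMap.mp hc' with ⟨c, hc, hmem⟩
  exact htChars_good_mem c (hl c hc) c' hmem

theorem subN_append (n : Nat) (l₁ l₂ : List Char) :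
    subN n (l₁ ++ l₂) = subN n l₁ ++ subN n l₂ := by
  induction n generalizing l₁ l₂ with
  | zero => rfl
  | succ n ih => simp only [subN, sub1, List.flatMap_append, ih]

theorem subN_nil (n : Nat) : subN n [] = [] := by
  induction n with
  | zero => rfl
  | succ n ih => simpa [subN, sub1] using ih

theorem subN_flat (n : Nat) (l : List Char) :
    subN n l = l.flatMap fun c => subN n [c] := by
  induction l with
  | nil => simp [subN_nil]
  | cons c l ih =>
    have h : (c :: l) = [c] ++ l := rfl
    rw [h, subN_append, ih, List.flatMap_append]
    simp

-- B's expander computes n-fold substitution of a single good character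
theorem expand_good (n : Nat) (c : Char) (hc : goodC c = true) :
    ((PySem.Int.ofChars? [c]).bind (fun dc => expandF n dc))
      = some (String.ofList (subN n [c])) := by
  induction n generalizing c with
  | zero => simpa [subN] using char_fact0 c hc
  | succ n ih =>
    have hassoc :
        ((PySem.Int.ofChars? [c]).bind (fun dc => expandF (n + 1) dc))
          = (((PySem.Int.ofChars? [c]).bind
                (fun d => PySem.List.pyGet? HashTable16 d)).bind fun s =>
              (s.toList.foldl
                  (fun acc c => acc.bind fun pieces =>
                    ((PySem.Int.ofChars? [c]).bind (fun dc => expandF n dc)).map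
                      (fun t => pieces ++ [t]))
                  (some [])).map (PySem.Str.join "")) := by
      cases PySem.Int.ofChars? [c] <;> simp [expandF]
    rw [hassoc, char_fact c hc]
    simp only [Option.bind_some]
    rw [show (String.ofList (htChars c)).toList = htChars c from by simp]
    rw [foldP_good _ (fun c' => String.ofList (subN n [c'])) (htChars c)
      (fun c' hc' => ih c' (htChars_good_mem c hc c' hc'))]
    simp only [Option.map_some, Option.some.injEq]
    rw [join_ofList]
    have : subN (n + 1) [c] = (htChars c).flatMap fun c' => subN n [c'] := by
      rw [show subN (n + 1) [c] = subN n (sub1 [c]) from rfl]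
      rw [show sub1 [c] = htChars c from by simp [sub1]]
      exact subN_flat n (htChars c)
    rw [this]

-- A's QuickChange performs one substitution pass on a good string
theorem qc_good (l : List Char) (hl : ∀ c ∈ l, goodC c = true) :
    QuickChange (String.ofList l) = some (String.ofList (sub1 l)) := by
  unfold QuickChange
  rw [show (String.ofList l).toList = l from by simp]
  rw [foldP_good _ (fun c => String.ofList (htChars c)) l
    (fun c hc => char_fact c (hl c hc))]
  simp only [Option.map_some, Option.some.injEq]
  exact join_ofList l htChars

-- n chained QuickChange passes
def qcN : Nat → Option String → Option String
  | 0, o => o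
  | n + 1, o => qcN n (o.bind QuickChange)

theorem qcN_good (n : Nat) (l : List Char) (hl : ∀ c ∈ l, goodC c = true) :
    qcN n (some (String.ofList l)) = some (String.ofList (subN n l)) := by
  induction n generalizing l with
  | zero => rfl
  | succ n ih =>
    show qcN n ((some (String.ofList l)).bind QuickChange) = _
    rw [Option.bind_some, qc_good l hl, ih (sub1 l) (sub1_good l hl)]
    rfl

theorem iter8A_eq_qcN (m : Int) : iter8A m = qcN 7 (QuickChangeInt m) := rfl

-- the per-index equality, given the table entry at m
theorem per_idx (m : Int) (l : List Char)
    (h1 : PySem.List.pyGet? HashTable16 m = some (String.ofList l))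
    (hg : ∀ c ∈ l, goodC c = true) :
    iter8A m = expandF 8 m := by
  have hqci : QuickChangeInt m = some (String.ofList l) := by
    unfold QuickChangeInt
    rw [h1]
    simp only [Option.map_some, Option.some.injEq]
    exact join_single _
  rw [iter8A_eq_qcN, hqci, qcN_good 7 l hg]
  show _ = (PySem.List.pyGet? HashTable16 m).bind _
  rw [h1, Option.bind_some]
  rw [show (String.ofList l).toList = l from by simp]
  rw [foldP_good _ (fun c => String.ofList (subN 7 [c])) l
    (fun c hc => expand_good 7 c (hg c hc))]
  simp only [Option.map_some, Option.some.injEq]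
  rw [join_ofList, ← subN_flat]

theorem per_idx_all (m : Int) (h0 : 0 ≤ m) (h8 : m ≤ 8) : iter8A m = expandF 8 m := by
  interval_cases m
  · exact per_idx 0 ['5','0','0','2','7'] (by decide) (allGood_mem _ (by decide))
  · exact per_idx 1 ['6','1','1','3','8'] (by decide) (allGood_mem _ (by decide))
  · exact per_idx 2 ['0','2','2','4'] (by decide) (allGood_mem _ (by decide))
  · exact per_idx 3 ['1','3','3','5'] (by decide) (allGood_mem _ (by decide))
  · exact per_idx 4 ['2','4','4','6'] (by decide) (allGood_mem _ (by decide))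
  · exact per_idx 5 ['3','5','5','7'] (by decide) (allGood_mem _ (by decide))
  · exact per_idx 6 ['4','6','6','8'] (by decide) (allGood_mem _ (by decide))
  · exact per_idx 7 ['5','0','7'] (by decide) (allGood_mem _ (by decide))
  · exact per_idx 8 ['6','1','8'] (by decide) (allGood_mem _ (by decide))

-- A's while loop fills shop[0..m] from the top down
theorem loopA_spec (m : Nat) (shop : List String) (hm : m < shop.length) :
    loopA (m + 1) (m : Int) shop
      = (List.range (m + 1)).map (fun i : Nat => (iter8A (i : Int)).getD "")
          ++ shop.drop (m + 1) := by
  induction m generalizing shop with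
  | zero =>
    cases shop with
    | nil => simp at hm
    | cons x t =>
      show loopA 0 ((0 : Int) - 1) (PySem.List.pySetD (x :: t) (0 : Int) _) = _
      rw [PySem.List.pySetD_of_nonneg _ _ (by omega)]
      simp [loopA, List.range_succ]
  | succ m ih =>
    show loopA (m + 1) (((m : Nat) + 1 : Int) - 1)
        (PySem.List.pySetD shop ((m : Nat) + 1 : Int) ((iter8A ((m : Nat) + 1 : Int)).getD ""))
        = _
    rw [PySem.List.pySetD_of_nonneg _ _ (by omega)]
    rw [show (((m : Nat) + 1 : Int)).toNat = m + 1 from by omega]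
    have hlen : m < (shop.set (m + 1) ((iter8A ((m : Nat) + 1 : Int)).getD "")).length := by
      simp only [List.length_set]; omega
    rw [show ((m : Nat) + 1 : Int) - 1 = ((m : Nat) : Int) from by ring]
    rw [ih _ hlen]
    rw [List.drop_set]
    rw [if_neg (by omega), Nat.sub_self]
    have hdrop : shop.drop (m + 1) = shop[m + 1] :: shop.drop (m + 2) :=
      List.drop_eq_getElem_cons hm
    rw [hdrop, List.set_cons_zero]
    simp [List.range_succ, List.append_assoc]

theorem shop_nonneg (M : Nat) :
    ShopPreparation (M : Int)
      = (List.range (M + 1)).map (fun i : Nat => (iter8A (i : Int)).getD "") := by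
  unfold ShopPreparation
  rw [show ((M : Int) + 1).toNat = M + 1 from by omega]
  rw [loopA_spec M (List.replicate (M + 1) "")
    (by simp only [List.length_replicate]; omega)]
  rw [List.drop_replicate]
  simp

-- ===== VERDICT (by name: the statement is the Claim_ definition above) =====
theorem ShopPreparation_spec : Claim_equal_ShopPreparation := by
  intro max _ hpre
  have hpre' : max ≤ 8 := hpre
  unfold Spec_ShopPreparation
  by_cases h0 : 0 ≤ max
  · obtain ⟨M, rfl⟩ : ∃ M : Nat, max = (M : Int) := ⟨max.toNat, by omega⟩
    rw [shop_nonneg M]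
    unfold ShopPreparation_alt
    rw [PySem.List.pyRange_one 0 ((M : Int) + 1)]
    rw [show ((M : Int) + 1 - 0).toNat = M + 1 from by omega]
    rw [List.map_map]
    refine List.map_congr_left ?_
    intro i hi
    have hi' : i < M + 1 := List.mem_range.mp hi
    have h8 : (i : Int) ≤ 8 := by omega
    simp only [Function.comp_apply]
    rw [show (0 : Int) + (i : Nat) = (i : Int) from by ring]
    rw [per_idx_all (i : Int) (by omega) h8]
  · have hneg : max < 0 := by omega
    unfold ShopPreparation ShopPreparation_alt
    rw [show (max + 1).toNat = 0 from by omega]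
    rw [PySem.List.pyRange_one_eq_nil (by omega)]
    rfl
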